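-- pv_equiv track=rewrite | github.com/wu55246842/GoalGazer | tools/pipeline/python/goalgazer/compose_article.py | _filter_limitations
-- ===== SOURCE A (Python) =====
-- from typing import Any, Dict, List, Optional
--
-- def _filter_limitations(limitations: List[str], availability: Dict[str, bool]) -> List[str]:
--     filtered: List[str] = []
--     for item in limitations:
--         lowered = item.lower()
--         if availability.get("has_xg") and ("xg" in lowered or "expected goals" in lowered):
--             continue
--         if availability.get("has_players") and ("player" in lowered or "rating" in lowered):
--             continue
--         if availability.get("has_shot_locations") and "shot location" in lowered:
--             continue
--         if availability.get("has_statistics") and "team-level statistics" in lowered: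
--             continue
--         filtered.append(item)
--     return filtered
-- ===== SOURCE B (Python) =====
-- from typing import Any, Dict, List, Optional
--
-- _RULES = [
--     ("has_xg", ("xg", "expected goals")),
--     ("has_players", ("player", "rating")),
--     ("has_shot_locations", ("shot location",)),
--     ("has_statistics", ("team-level statistics",)),
-- ]
--
-- def _filter_limitations(limitations: List[str], availability: Dict[str, bool]) -> List[str]:
--     result = list(limitations)
--     for flag, patterns in _RULES:
--         if availability.get(flag):
--             result = [item for item in result
--                       if not any(p in item.lower() for p in patterns)]
--     return result
-- ===== Notes on version B (the rewrite author's own statement) =====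
-- stated objective: alternative
-- what changed: A makes one pass over the items testing four flag-guarded substring branches per item; B is rule-driven and staged: it walks a rules table and, for each active availability flag, applies a separate filter pass that removes that rule's pattern matches from the progressively shrinking list.
import Mathlib
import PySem

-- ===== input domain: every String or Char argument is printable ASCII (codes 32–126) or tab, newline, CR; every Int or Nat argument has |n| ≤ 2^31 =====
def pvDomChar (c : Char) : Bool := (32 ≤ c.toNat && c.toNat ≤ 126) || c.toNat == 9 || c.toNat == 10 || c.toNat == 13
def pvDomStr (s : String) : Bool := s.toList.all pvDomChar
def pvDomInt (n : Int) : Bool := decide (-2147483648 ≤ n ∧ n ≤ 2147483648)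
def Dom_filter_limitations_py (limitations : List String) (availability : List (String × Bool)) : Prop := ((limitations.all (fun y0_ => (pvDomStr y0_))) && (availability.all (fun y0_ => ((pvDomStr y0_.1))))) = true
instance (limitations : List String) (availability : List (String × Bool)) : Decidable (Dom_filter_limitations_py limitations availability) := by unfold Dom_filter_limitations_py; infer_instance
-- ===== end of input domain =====

-- B replaces A's single loop with four flag-guarded if/continue branches by a rule table
-- driving staged filter passes, one per active flag (objective: alternative decomposition).


-- ===== PORT A =====
def filter_limitations_py (limitations : List String) (availability : List (String × Bool)) : List String :=
  let d := PySem.Dict.mk availability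
  limitations.foldl (fun filtered item =>
    let lowered := PySem.Str.lower item
    if d.getD "has_xg" false && (PySem.Str.isIn "xg" lowered || PySem.Str.isIn "expected goals" lowered) then filtered
    else if d.getD "has_players" false && (PySem.Str.isIn "player" lowered || PySem.Str.isIn "rating" lowered) then filtered
    else if d.getD "has_shot_locations" false && PySem.Str.isIn "shot location" lowered then filtered
    else if d.getD "has_statistics" false && PySem.Str.isIn "team-level statistics" lowered then filtered
    else filtered ++ [item]) []

-- ===== PORT B =====
-- the module-level _RULES table of Source B
def pvRules : List (String × List String) :=
  [("has_xg", ["xg", "expected goals"]),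
   ("has_players", ["player", "rating"]),
   ("has_shot_locations", ["shot location"]),
   ("has_statistics", ["team-level statistics"])]

def filter_limitations_py_alt (limitations : List String) (availability : List (String × Bool)) : List String :=
  let d := PySem.Dict.mk availability
  pvRules.foldl (fun result rule =>
    if d.getD rule.1 false then
      result.filter (fun item => !(rule.2.any (fun p => PySem.Str.isIn p (PySem.Str.lower item))))
    else result) limitations

-- ===== PRECONDITION & SPEC =====
def Spec_filter_limitations_py (limitations : List String) (availability : List (String × Bool)) (out : List String) : Prop := out = filter_limitations_py_alt limitations availability
instance (limitations : List String) (availability : List (String × Bool)) (out : List String) : Decidable (Spec_filter_limitations_py limitations availability out) := by unfold Spec_filter_limitations_py; infer_instance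

-- ===== CLAIM (what is proved, stated in full; the proofs are below) =====
def Claim_equal_filter_limitations_py : Prop := ∀ (limitations : List String) (availability : List (String × Bool)), Dom_filter_limitations_py limitations availability → Spec_filter_limitations_py limitations availability (filter_limitations_py limitations availability)

-- ===== LEMMAS AND PROOFS =====

-- the per-item skip condition of A, as one boolean
def pvSkip (d : PySem.Dict String Bool) (item : String) : Bool :=
  (d.getD "has_xg" false && (PySem.Str.isIn "xg" (PySem.Str.lower item) || PySem.Str.isIn "expected goals" (PySem.Str.lower item))) ||
  (d.getD "has_players" false && (PySem.Str.isIn "player" (PySem.Str.lower item) || PySem.Str.isIn "rating" (PySem.Str.lower item))) ||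
  (d.getD "has_shot_locations" false && PySem.Str.isIn "shot location" (PySem.Str.lower item)) ||
  (d.getD "has_statistics" false && PySem.Str.isIn "team-level statistics" (PySem.Str.lower item))

-- a chain of ifs returning the same value collapses to one disjunction
lemma pv_ifchain (c1 c2 c3 c4 : Bool) (x y : List String) :
    (if c1 then x else if c2 then x else if c3 then x else if c4 then x else y)
    = if c1 || c2 || c3 || c4 then x else y := by
  cases c1 <;> cases c2 <;> cases c3 <;> cases c4 <;> simp

-- A's nested if/continue body collapses to one test on pvSkip
lemma body_eq (d : PySem.Dict String Bool) (filtered : List String) (item : String) :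
    (if d.getD "has_xg" false && (PySem.Str.isIn "xg" (PySem.Str.lower item) || PySem.Str.isIn "expected goals" (PySem.Str.lower item)) then filtered
     else if d.getD "has_players" false && (PySem.Str.isIn "player" (PySem.Str.lower item) || PySem.Str.isIn "rating" (PySem.Str.lower item)) then filtered
     else if d.getD "has_shot_locations" false && PySem.Str.isIn "shot location" (PySem.Str.lower item) then filtered
     else if d.getD "has_statistics" false && PySem.Str.isIn "team-level statistics" (PySem.Str.lower item) then filtered
     else filtered ++ [item])
    = if pvSkip d item then filtered else filtered ++ [item] := by
  rw [pv_ifchain]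
  rfl

-- A's loop, with the collapsed body, is a filter
lemma foldl_skip_eq_filter (d : PySem.Dict String Bool) (l : List String) (acc : List String) :
    l.foldl (fun filtered item => if pvSkip d item then filtered else filtered ++ [item]) acc
    = acc ++ l.filter (fun item => !(pvSkip d item)) := by
  induction l generalizing acc with
  | nil => simp
  | cons a t ih =>
    cases hs : pvSkip d a <;> simp [hs, ih]

-- a conditional filter pass as one filter
lemma pv_filter_if {α : Type} (c : Bool) (p : α → Bool) (l : List α) :
    (if c then l.filter p else l) = l.filter (fun x => !c || p x) := by
  cases c <;> simp

-- two filter passes compose into one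
lemma pv_filter_filter {α : Type} (p q : α → Bool) (l : List α) :
    (l.filter p).filter q = l.filter (fun x => p x && q x) := by
  induction l with
  | nil => rfl
  | cons a t ih => cases hp : p a <;> cases hq : q a <;> simp [hp, hq, ih]

-- B's four staged filter passes compose to one filter on the negated skip condition
lemma staged_eq_filter (d : PySem.Dict String Bool) (l : List String) :
    pvRules.foldl (fun result rule =>
      if d.getD rule.1 false then
        result.filter (fun item => !(rule.2.any (fun p => PySem.Str.isIn p (PySem.Str.lower item))))
      else result) l
    = l.filter (fun item => !(pvSkip d item)) := by
  simp only [pvRules, List.foldl]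
  rw [pv_filter_if, pv_filter_if, pv_filter_if, pv_filter_if,
      pv_filter_filter, pv_filter_filter, pv_filter_filter]
  congr 1
  funext item
  simp only [pvSkip, List.any_cons, List.any_nil, Bool.or_false]
  generalize d.getD "has_xg" false = c1
  generalize d.getD "has_players" false = c2
  generalize d.getD "has_shot_locations" false = c3
  generalize d.getD "has_statistics" false = c4
  generalize PySem.Str.isIn "xg" (PySem.Str.lower item) = x1
  generalize PySem.Str.isIn "expected goals" (PySem.Str.lower item) = x2
  generalize PySem.Str.isIn "player" (PySem.Str.lower item) = x3
  generalize PySem.Str.isIn "rating" (PySem.Str.lower item) = x4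
  generalize PySem.Str.isIn "shot location" (PySem.Str.lower item) = x5
  generalize PySem.Str.isIn "team-level statistics" (PySem.Str.lower item) = x6
  cases c1 <;> cases c2 <;> cases c3 <;> cases c4 <;>
    cases x1 <;> cases x2 <;> cases x3 <;> cases x4 <;> cases x5 <;> cases x6 <;> rfl

-- ===== VERDICT (by name: the statement is the Claim_ definition above) =====
theorem filter_limitations_py_spec : Claim_equal_filter_limitations_py := by
  intro limitations availability _
  unfold Spec_filter_limitations_py filter_limitations_py filter_limitations_py_alt
  dsimp only
  have hbody :
      (fun (filtered : List String) (item : String) =>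
        if (PySem.Dict.mk availability).getD "has_xg" false && (PySem.Str.isIn "xg" (PySem.Str.lower item) || PySem.Str.isIn "expected goals" (PySem.Str.lower item)) then filtered
        else if (PySem.Dict.mk availability).getD "has_players" false && (PySem.Str.isIn "player" (PySem.Str.lower item) || PySem.Str.isIn "rating" (PySem.Str.lower item)) then filtered
        else if (PySem.Dict.mk availability).getD "has_shot_locations" false && PySem.Str.isIn "shot location" (PySem.Str.lower item) then filtered
        else if (PySem.Dict.mk availability).getD "has_statistics" false && PySem.Str.isIn "team-level statistics" (PySem.Str.lower item) then filtered
        else filtered ++ [item])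
      = fun filtered item => if pvSkip (PySem.Dict.mk availability) item then filtered else filtered ++ [item] :=
    funext fun f => funext fun it => body_eq _ f it
  rw [hbody, foldl_skip_eq_filter, List.nil_append, staged_eq_filter]
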